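-- pv_equiv track=rewrite | github.com/resoltico/FTLLexEngine | src/ftllexengine/core/value_types.py | _iter_numeric_segments
-- ===== SOURCE A (Python) =====
-- _NUMERIC_SEGMENT_CHARS: frozenset[str] = frozenset({
--     " ",
--     "'",
--     "(",
--     ")",
--     "+",
--     ",",
--     "-",
--     ".",
--     "_",
--     "\u00a0",
--     "\u066b",
--     "\u066c",
--     "\u202f",
-- })
--
-- def _iter_numeric_segments(formatted: str) -> tuple[str, ...]:
--     """Extract digit-containing numeric segments from a formatted string."""
--     segments: list[str] = []
--     current: list[str] = []
--     saw_digit = False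
--
--     for char in formatted:
--         if char.isdigit() or char in _NUMERIC_SEGMENT_CHARS:
--             current.append(char)
--             saw_digit = saw_digit or char.isdigit()
--             continue
--
--         if saw_digit:
--             segments.append("".join(current).strip())
--         current = []
--         saw_digit = False
--
--     if saw_digit:
--         segments.append("".join(current).strip())
--
--     return tuple(segment for segment in segments if any(char.isdigit() for char in segment))
-- ===== SOURCE B (Python) =====
-- _NUMERIC_SEGMENT_CHARS: frozenset[str] = frozenset({
--     " ", "'", "(", ")", "+", ",", "-", ".", "_",
--     "\u00a0", "\u066b", "\u066c", "\u202f",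
-- })
--
--
-- def _allowed(c: str) -> bool:
--     return c.isdigit() or c in _NUMERIC_SEGMENT_CHARS
--
--
-- def _iter_numeric_segments(formatted: str) -> tuple[str, ...]:
--     """Extract digit-containing numeric segments from a formatted string.
--
--     Digit-anchored scan: jump to the next digit, expand left and right to the
--     boundaries of the allowed-character run around it, emit the stripped slice,
--     then resume past that run. No run partitioning and no per-char accumulator.
--     """
--     out: list[str] = []
--     n = len(formatted)
--     i = 0
--     while i < n:
--         if formatted[i].isdigit():
--             start = i
--             while start > 0 and _allowed(formatted[start - 1]):
--                 start -= 1
--             end = i + 1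
--             while end < n and _allowed(formatted[end]):
--                 end += 1
--             out.append(formatted[start:end].strip())
--             i = end + 1
--         else:
--             i += 1
--     return tuple(out)
-- ===== Notes on version B (the rewrite author's own statement) =====
-- stated objective: alternative
-- what changed: Replaces A's run-accumulating single pass (current buffer + saw_digit flag + flush) by a digit-anchored index scan: find the next digit, expand left and right to the boundaries of the allowed-character run around it, emit the stripped slice, and jump past that run - allowed runs without digits are never materialized.
import Mathlib
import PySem

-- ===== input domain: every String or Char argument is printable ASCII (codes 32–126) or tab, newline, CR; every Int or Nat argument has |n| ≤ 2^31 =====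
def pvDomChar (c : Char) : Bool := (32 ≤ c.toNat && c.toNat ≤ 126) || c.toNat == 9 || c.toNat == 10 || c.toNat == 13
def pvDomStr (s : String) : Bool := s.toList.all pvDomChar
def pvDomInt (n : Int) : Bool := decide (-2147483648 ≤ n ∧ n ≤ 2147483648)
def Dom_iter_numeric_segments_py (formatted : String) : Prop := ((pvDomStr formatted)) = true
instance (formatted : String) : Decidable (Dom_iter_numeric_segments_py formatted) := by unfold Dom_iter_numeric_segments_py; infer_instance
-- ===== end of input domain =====

-- B replaces A's run-accumulating pass (buffer + saw_digit flag + flush) by a digit-anchored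
-- index scan (find next digit, expand to the run boundaries, emit, jump past the run);
-- same cost, different algorithmic decomposition; equivalence proved below.

-- ===== PORT A =====
-- _NUMERIC_SEGMENT_CHARS
def pvSegChars : List Char :=
  [' ', '\'', '(', ')', '+', ',', '-', '.', '_', '\u00A0', '\u066B', '\u066C', '\u202F']

-- char.isdigit() or char in _NUMERIC_SEGMENT_CHARS  (A's loop test; B's helper _allowed)
def pvAllowed (c : Char) : Bool := PySem.Chars.isdigit c || pvSegChars.contains c

-- the flush "if saw_digit: segments.append(''.join(current).strip())" (appears in the loop and after it)
def pvFlush (st : List String × List Char × Bool) : List String :=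
  if st.2.2 then st.1 ++ [String.ofList (PySem.Chars.strip st.2.1)] else st.1

-- one iteration of A's for-loop over the state (segments, current, saw_digit)
def pvStepA (st : List String × List Char × Bool) (c : Char) : List String × List Char × Bool :=
  if pvAllowed c then (st.1, st.2.1 ++ [c], st.2.2 || PySem.Chars.isdigit c)
  else (pvFlush st, [], false)

def iter_numeric_segments_py (formatted : String) : List String :=
  (pvFlush (formatted.toList.foldl pvStepA ([], [], false))).filter
    (fun seg => seg.toList.any PySem.Chars.isdigit)

-- ===== PORT B =====
-- "while start > 0 and _allowed(formatted[start - 1]): start -= 1"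
def pvExpL (l : List Char) : Nat → Nat
  | 0 => 0
  | s + 1 => if pvAllowed (l.getD s ' ') then pvExpL l s else s + 1

-- "while end < n and _allowed(formatted[end]): end += 1"
def pvExpR (l : List Char) (e : Nat) : Nat :=
  if h : e < l.length then
    if pvAllowed (l.getD e ' ') then pvExpR l (e + 1) else e
  else e
termination_by l.length - e

-- termination fact for pvSeek's jump "i = end + 1" (cited in its decreasing_by)
theorem pvExpR_ge (l : List Char) (e : Nat) : e ≤ pvExpR l e := by
  unfold pvExpR
  split
  · split
    · have := pvExpR_ge l (e + 1); omega
    · exact Nat.le_refl e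
  · exact Nat.le_refl e
termination_by l.length - e

-- B's outer "while i < n" loop
def pvSeek (l : List Char) (i : Nat) : List String :=
  if h : i < l.length then
    if PySem.Chars.isdigit (l.getD i ' ') then
      String.ofList (PySem.Chars.strip ((l.take (pvExpR l (i + 1))).drop (pvExpL l i)))
        :: pvSeek l (pvExpR l (i + 1) + 1)
    else pvSeek l (i + 1)
  else []
termination_by l.length - i
decreasing_by
  · have := pvExpR_ge l (i + 1); omega
  · omega

def iter_numeric_segments_py_alt (formatted : String) : List String :=
  pvSeek formatted.toList 0

-- ===== PRECONDITION & SPEC =====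
def Spec_iter_numeric_segments_py (formatted : String) (out : List String) : Prop := out = iter_numeric_segments_py_alt formatted
instance (formatted : String) (out : List String) : Decidable (Spec_iter_numeric_segments_py formatted out) := by unfold Spec_iter_numeric_segments_py; infer_instance

-- ===== CLAIM (what is proved, stated in full; the proofs are below) =====
def Claim_equal_iter_numeric_segments_py : Prop := ∀ (formatted : String), Dom_iter_numeric_segments_py formatted → Spec_iter_numeric_segments_py formatted (iter_numeric_segments_py formatted)

-- ===== LEMMAS AND PROOFS =====

-- proof-side middle ground: the maximal equal-key runs of the string and the segment each run contributes
def pvGroupRuns (l : List Char) : List (Bool × List Char) :=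
  match l with
  | [] => []
  | c :: rest =>
    (pvAllowed c, c :: rest.takeWhile (fun d => pvAllowed d == pvAllowed c)) ::
      pvGroupRuns (rest.dropWhile (fun d => pvAllowed d == pvAllowed c))
termination_by l.length
decreasing_by
  have := List.length_dropWhile_le (fun d => pvAllowed d == pvAllowed c) rest
  simp only [List.length_cons]; omega

def pvEmit (g : Bool × List Char) : Option String :=
  if g.1 && g.2.any PySem.Chars.isdigit then some (String.ofList (PySem.Chars.strip g.2)) else none

-- a digit character is not Python whitespace
theorem pv_digit_not_space (c : Char) (h : PySem.Chars.isdigit c = true) :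
    PySem.Chars.isspace c = false := by
  simp only [PySem.Chars.isdigit, Bool.and_eq_true, decide_eq_true_eq, Char.le_def,
    UInt32.le_iff_toNat_le] at h
  have h48 : ('0' : Char).val.toNat = 48 := rfl
  have h57 : ('9' : Char).val.toNat = 57 := rfl
  rw [h48] at h; rw [h57] at h
  simp only [PySem.Chars.isspace, Char.toNat]
  simp only [Bool.or_eq_false_iff, Bool.and_eq_false_iff, decide_eq_false_iff_not]
  omega

theorem pv_any_digit_dropWhile (l : List Char) (h : l.any PySem.Chars.isdigit = true) :
    (l.dropWhile PySem.Chars.isspace).any PySem.Chars.isdigit = true := by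
  induction l with
  | nil => simp at h
  | cons c t ih =>
    by_cases hc : PySem.Chars.isspace c = true
    · rw [List.dropWhile_cons_of_pos hc]
      apply ih
      have hcd : PySem.Chars.isdigit c = false := by
        by_contra hd
        rw [pv_digit_not_space c (by simpa using hd)] at hc
        exact Bool.false_ne_true hc
      simpa [hcd] using h
    · rw [List.dropWhile_cons_of_neg hc]
      exact h

-- stripping keeps a digit in the segment
theorem pv_any_digit_strip (cs : List Char) (h : cs.any PySem.Chars.isdigit = true) :
    (PySem.Chars.strip cs).any PySem.Chars.isdigit = true := by
  simp only [PySem.Chars.strip, PySem.Chars.lstrip, PySem.Chars.rstrip]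
  rw [List.any_reverse]
  apply pv_any_digit_dropWhile
  rw [List.any_reverse]
  exact pv_any_digit_dropWhile _ h

-- A's fold over a run of allowed characters just accumulates the buffer and flag
theorem pv_foldl_allowed (run : List Char) (hall : ∀ d ∈ run, pvAllowed d = true) :
    ∀ segs cur saw, run.foldl pvStepA (segs, cur, saw)
      = (segs, cur ++ run, saw || run.any PySem.Chars.isdigit) := by
  induction run with
  | nil => intro segs cur saw; simp
  | cons c t ih =>
    intro segs cur saw
    have hc : pvAllowed c = true := hall c (by simp)
    simp only [List.foldl_cons, pvStepA, hc, if_pos]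
    rw [ih (fun d hd => hall d (by simp [hd]))]
    simp [Bool.or_assoc]

-- from a clean state, A's fold over disallowed characters leaves the state unchanged
theorem pv_foldl_disallowed (run : List Char) (hall : ∀ d ∈ run, pvAllowed d = false) :
    ∀ segs, run.foldl pvStepA (segs, [], false) = (segs, [], false) := by
  induction run with
  | nil => intro segs; simp
  | cons c t ih =>
    intro segs
    have hc : pvAllowed c = false := hall c (by simp)
    have hstep : pvStepA (segs, [], false) c = (segs, [], false) := by
      simp [pvStepA, hc, pvFlush]
    rw [List.foldl_cons, hstep]
    exact ih (fun d hd => hall d (by simp [hd])) segs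

-- A-side invariant: A's loop + final flush, from a clean buffer, appends exactly the runs' emissions
theorem pv_main (l : List Char) :
    ∀ segs, pvFlush (l.foldl pvStepA (segs, [], false))
      = segs ++ (pvGroupRuns l).filterMap pvEmit := by
  induction l using pvGroupRuns.induct with
  | case1 => intro segs; simp [pvGroupRuns, pvFlush]
  | case2 c rest ih =>
    intro segs
    have hsplit : c :: rest = (c :: rest.takeWhile (fun d => pvAllowed d == pvAllowed c))
        ++ rest.dropWhile (fun d => pvAllowed d == pvAllowed c) := by
      rw [List.cons_append, List.takeWhile_append_dropWhile]
    rw [pvGroupRuns]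
    by_cases hk : pvAllowed c = true
    · -- allowed run
      have hrun : ∀ d ∈ c :: rest.takeWhile (fun d => pvAllowed d == pvAllowed c),
          pvAllowed d = true := by
        intro d hd
        rcases List.mem_cons.mp hd with h | h
        · rw [h]; exact hk
        · have := List.mem_takeWhile_imp h
          simpa [hk] using this
      rw [hsplit, List.foldl_append, pv_foldl_allowed _ hrun, List.nil_append, Bool.false_or]
      rcases hdw : rest.dropWhile (fun d => pvAllowed d == pvAllowed c) with _ | ⟨c', dw'⟩
      · rw [List.foldl_nil, List.filterMap_cons]
        rcases hda : (c :: rest.takeWhile (fun d => pvAllowed d == pvAllowed c)).any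
            PySem.Chars.isdigit with _ | _
        · have hem : pvEmit (pvAllowed c,
              c :: rest.takeWhile (fun d => pvAllowed d == pvAllowed c)) = none := by
            simp only [pvEmit]; rw [hda]; simp
          rw [hem]
          simp [pvFlush, pvGroupRuns]
        · have hem : pvEmit (pvAllowed c,
              c :: rest.takeWhile (fun d => pvAllowed d == pvAllowed c))
              = some (String.ofList (PySem.Chars.strip
                  (c :: rest.takeWhile (fun d => pvAllowed d == pvAllowed c)))) := by
            simp only [pvEmit]; rw [hda, hk]; simp
          rw [hem]
          simp [pvFlush, pvGroupRuns]
      · have hc' : pvAllowed c' = false := by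
          have h2 := List.head?_dropWhile_not (fun d => pvAllowed d == pvAllowed c) rest
          rw [hdw] at h2
          simp only [List.head?_cons] at h2
          simpa [hk] using h2
        rw [List.foldl_cons]
        have hstep : pvStepA (segs,
            c :: rest.takeWhile (fun d => pvAllowed d == pvAllowed c),
            (c :: rest.takeWhile (fun d => pvAllowed d == pvAllowed c)).any
              PySem.Chars.isdigit) c'
            = (pvFlush (segs, c :: rest.takeWhile (fun d => pvAllowed d == pvAllowed c),
                (c :: rest.takeWhile (fun d => pvAllowed d == pvAllowed c)).any
                  PySem.Chars.isdigit), [], false) := by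
          simp [pvStepA, hc']
        rw [hstep]
        have hswap : dw'.foldl pvStepA
            (pvFlush (segs, c :: rest.takeWhile (fun d => pvAllowed d == pvAllowed c),
              (c :: rest.takeWhile (fun d => pvAllowed d == pvAllowed c)).any
                PySem.Chars.isdigit), [], false)
            = (c' :: dw').foldl pvStepA
            (pvFlush (segs, c :: rest.takeWhile (fun d => pvAllowed d == pvAllowed c),
              (c :: rest.takeWhile (fun d => pvAllowed d == pvAllowed c)).any
                PySem.Chars.isdigit), [], false) := by
          rw [List.foldl_cons]
          have : ∀ S : List String, pvStepA (S, [], false) c' = (S, [], false) := by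
            intro S; simp [pvStepA, hc', pvFlush]
          rw [this]
        rw [hswap, ← hdw, ih, List.filterMap_cons]
        rcases hda : (c :: rest.takeWhile (fun d => pvAllowed d == pvAllowed c)).any
            PySem.Chars.isdigit with _ | _
        · have hem : pvEmit (pvAllowed c,
              c :: rest.takeWhile (fun d => pvAllowed d == pvAllowed c)) = none := by
            simp only [pvEmit]; rw [hda]; simp
          rw [hem]
          simp [pvFlush]
        · have hem : pvEmit (pvAllowed c,
              c :: rest.takeWhile (fun d => pvAllowed d == pvAllowed c))
              = some (String.ofList (PySem.Chars.strip
                  (c :: rest.takeWhile (fun d => pvAllowed d == pvAllowed c)))) := by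
            simp only [pvEmit]; rw [hda, hk]; simp
          rw [hem]
          simp [pvFlush]
    · -- disallowed run
      have hk' : pvAllowed c = false := by simpa using hk
      have hrun : ∀ d ∈ rest.takeWhile (fun d => pvAllowed d == pvAllowed c),
          pvAllowed d = false := by
        intro d hd
        have := List.mem_takeWhile_imp hd
        simpa [hk'] using this
      have hfold : (c :: rest).foldl pvStepA (segs, [], false)
          = (rest.dropWhile (fun d => pvAllowed d == pvAllowed c)).foldl pvStepA
              (segs, [], false) := by
        rw [hsplit, List.foldl_append, List.foldl_cons]
        have hstep : pvStepA (segs, [], false) c = (segs, [], false) := by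
          simp [pvStepA, hk', pvFlush]
        rw [hstep, pv_foldl_disallowed _ hrun]
      rw [hfold, ih, List.filterMap_cons]
      have hem : pvEmit (pvAllowed c,
          c :: rest.takeWhile (fun d => pvAllowed d == pvAllowed c)) = none := by
        simp only [pvEmit, hk', Bool.false_and]; rfl
      rw [hem]

-- ---- B-side lemmas ----

theorem pvExpL_le (l : List Char) : ∀ s, pvExpL l s ≤ s := by
  intro s
  induction s with
  | zero => exact Nat.le_refl 0
  | succ s ih =>
    unfold pvExpL
    split
    · omega
    · exact Nat.le_refl _

theorem pvExpL_all (l : List Char) : ∀ s, ∀ c ∈ (l.take s).drop (pvExpL l s), pvAllowed c = true := by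
  intro s
  induction s with
  | zero => simp
  | succ s ih =>
    unfold pvExpL
    rcases ha : pvAllowed (l.getD s ' ') with _ | _
    · rw [if_neg (by simp)]
      intro c hc
      rw [List.drop_eq_nil_of_le (by simp [List.length_take])] at hc
      simp at hc
    · rw [if_pos rfl]
      by_cases hsn : s < l.length
      · rw [List.take_succ_eq_append_getElem hsn,
          List.drop_append_of_le_length (by simp; exact ⟨pvExpL_le l s, Nat.le_trans (pvExpL_le l s) (by omega)⟩)]
        intro c hc
        rcases List.mem_append.mp hc with h | h
        · exact ih c h
        · have hcs : c = l[s] := by simpa using h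
          rw [hcs, ← List.getD_eq_getElem l ' ' hsn]
          exact ha
      · have h1 : l.take (s + 1) = l.take s := by
          rw [List.take_of_length_le (by omega), List.take_of_length_le (by omega)]
        rw [h1]; exact ih

theorem pvExpR_le (l : List Char) (e : Nat) (h : e ≤ l.length) : pvExpR l e ≤ l.length := by
  unfold pvExpR
  split
  · split
    · exact pvExpR_le l (e + 1) (by omega)
    · exact h
  · exact h
termination_by l.length - e

theorem pvExpR_dropWhile (l : List Char) (e : Nat) :
    l.drop (pvExpR l e) = (l.drop e).dropWhile pvAllowed := by
  unfold pvExpR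
  split
  · next h =>
    rw [List.drop_eq_getElem_cons h, List.getD_eq_getElem l ' ' h]
    split
    · next ha =>
      rw [List.dropWhile_cons_of_pos ha]
      exact pvExpR_dropWhile l (e + 1)
    · next ha =>
      rw [List.dropWhile_cons_of_neg ha, ← List.drop_eq_getElem_cons h]
  · next h =>
    rw [List.drop_eq_nil_of_le (by omega)]
    simp
termination_by l.length - e

theorem pvExpR_takeWhile (l : List Char) (e : Nat) :
    (l.take (pvExpR l e)).drop e = (l.drop e).takeWhile pvAllowed := by
  unfold pvExpR
  split
  · next h =>
    rw [List.drop_eq_getElem_cons h, List.getD_eq_getElem l ' ' h]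
    split
    · next ha =>
      rw [List.takeWhile_cons_of_pos ha]
      have hge := pvExpR_ge l (e + 1)
      have hlen : e < (l.take (pvExpR l (e + 1))).length := by
        simp [List.length_take]; omega
      rw [List.drop_eq_getElem_cons hlen]
      have hgt : (l.take (pvExpR l (e + 1)))[e]'hlen = l[e] := List.getElem_take
      rw [hgt]
      rw [pvExpR_takeWhile l (e + 1)]
    · next ha =>
      rw [List.takeWhile_cons_of_neg ha, List.drop_eq_nil_of_le (by simp [List.length_take])]
  · next h =>
    rw [List.drop_eq_nil_of_le (as := l.take e) (by rw [List.length_take]; omega),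
      List.drop_eq_nil_of_le (as := l) (by omega)]
    simp
termination_by l.length - e

-- splitting a drop at an intermediate index
theorem pvDropSplit (l : List Char) (r i : Nat) (hri : r ≤ i) (hin : i ≤ l.length) :
    (l.take i).drop r ++ l.drop i = l.drop r := by
  conv_rhs => rw [← List.take_append_drop i l]
  rw [List.drop_append_of_le_length (by simp; omega)]

-- group runs of (allowed run ++ rest) where rest starts disallowed
theorem pvGroupRuns_run (seg rest : List Char) (hne : seg ≠ [])
    (hall : ∀ c ∈ seg, pvAllowed c = true)
    (hrest : ∀ d ∈ rest.head?, pvAllowed d = false) :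
    pvGroupRuns (seg ++ rest) = (true, seg) :: pvGroupRuns rest := by
  obtain ⟨c, seg', rfl⟩ := List.exists_cons_of_ne_nil hne
  have hc : pvAllowed c = true := hall c (by simp)
  rw [List.cons_append, pvGroupRuns]
  have hkey : (fun d => pvAllowed d == pvAllowed c) = pvAllowed := by
    funext d; rw [hc]; cases pvAllowed d <;> rfl
  rw [hkey, hc]
  have hall' : ∀ d ∈ seg', pvAllowed d = true := fun d hd => hall d (by simp [hd])
  rw [List.takeWhile_append_of_pos hall', List.dropWhile_append_of_pos hall']
  have htw : rest.takeWhile pvAllowed = [] := by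
    cases rest with
    | nil => rfl
    | cons d rest' =>
      have hd : pvAllowed d = false := hrest d (by simp)
      rw [List.takeWhile_cons_of_neg (by simp [hd])]
  have hdw : rest.dropWhile pvAllowed = rest := by
    cases rest with
    | nil => rfl
    | cons d rest' =>
      have hd : pvAllowed d = false := hrest d (by simp)
      rw [List.dropWhile_cons_of_neg (by simp [hd])]
  rw [htw, hdw, List.append_nil]

-- skipping a disallowed head does not change the emitted segments
theorem pvSkip (c : Char) (t : List Char) (hc : pvAllowed c = false) :
    (pvGroupRuns (c :: t)).filterMap pvEmit = (pvGroupRuns t).filterMap pvEmit := by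
  rw [pvGroupRuns, hc, List.filterMap_cons_none (by simp [pvEmit])]
  cases t with
  | nil => rfl
  | cons d t' =>
    rcases hd : pvAllowed d with _ | _
    · rw [List.dropWhile_cons_of_pos (by simp [hd])]
      conv_rhs => rw [pvGroupRuns]
      rw [hd, List.filterMap_cons_none (by simp [pvEmit])]
    · rw [List.dropWhile_cons_of_neg (by simp [hd])]

-- an all-allowed digit-free tail emits nothing
theorem pvNoDig (pre : List Char) (hall : ∀ c ∈ pre, pvAllowed c = true)
    (hnd : pre.any PySem.Chars.isdigit = false) :
    (pvGroupRuns pre).filterMap pvEmit = [] := by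
  rcases pre with _ | ⟨c, pre'⟩
  · simp [pvGroupRuns]
  · have h1 := pvGroupRuns_run (c :: pre') [] (by simp) hall (by simp)
    rw [List.append_nil] at h1
    rw [h1, List.filterMap_cons_none (by simp [pvEmit, hnd])]
    simp [pvGroupRuns]

-- MAIN: B's scan from position i equals the runs' emissions of the rest of the string,
-- provided the current partial run [pvExpL l i, i) holds no digit
theorem pvSeek_eq (l : List Char) (i : Nat) (hin : i ≤ l.length)
    (hnd : ((l.take i).drop (pvExpL l i)).any PySem.Chars.isdigit = false) :
    pvSeek l i = (pvGroupRuns (l.drop (pvExpL l i))).filterMap pvEmit := by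
  unfold pvSeek
  split
  · next h =>
    rw [List.getD_eq_getElem l ' ' h]
    split
    · next hd =>
      have hge : i + 1 ≤ pvExpR l (i + 1) := pvExpR_ge l (i + 1)
      have hEn : pvExpR l (i + 1) ≤ l.length := pvExpR_le l (i + 1) (by omega)
      have hrle : pvExpL l i ≤ i := pvExpL_le l i
      have hmid : (l.take (pvExpR l (i + 1))).drop i
          = l[i] :: (l.drop (i + 1)).takeWhile pvAllowed := by
        have hlen : i < (l.take (pvExpR l (i + 1))).length := by rw [List.length_take]; omega
        rw [List.drop_eq_getElem_cons hlen]
        have hgt : (l.take (pvExpR l (i + 1)))[i]'hlen = l[i] := List.getElem_take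
        rw [hgt, pvExpR_takeWhile l (i + 1)]
      have hsegsplit : (l.take (pvExpR l (i + 1))).drop (pvExpL l i)
          = (l.take i).drop (pvExpL l i) ++ (l.take (pvExpR l (i + 1))).drop i := by
        have hds := pvDropSplit (l.take (pvExpR l (i + 1))) (pvExpL l i) i hrle
          (by rw [List.length_take]; omega)
        rw [List.take_take, min_eq_left (by omega)] at hds
        exact hds.symm
      have hallseg : ∀ c ∈ (l.take (pvExpR l (i + 1))).drop (pvExpL l i), pvAllowed c = true := by
        rw [hsegsplit]
        intro c hcmem
        rcases List.mem_append.mp hcmem with hm | hm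
        · exact pvExpL_all l i c hm
        · rw [hmid] at hm
          rcases List.mem_cons.mp hm with hm1 | hm1
          · rw [hm1]; simp [pvAllowed, hd]
          · exact List.mem_takeWhile_imp hm1
      have hsegne : (l.take (pvExpR l (i + 1))).drop (pvExpL l i) ≠ [] := by
        have hlen : ((l.take (pvExpR l (i + 1))).drop (pvExpL l i)).length
            = pvExpR l (i + 1) - pvExpL l i := by
          rw [List.length_drop, List.length_take]; omega
        intro hnil; rw [hnil] at hlen; simp at hlen; omega
      have hresthead : ∀ d ∈ (l.drop (pvExpR l (i + 1))).head?, pvAllowed d = false := by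
        rw [pvExpR_dropWhile l (i + 1)]
        intro d hdm
        have h2 := List.head?_dropWhile_not pvAllowed (l.drop (i + 1))
        rcases hh : (List.dropWhile pvAllowed (l.drop (i + 1))).head? with _ | d'
        · rw [hh] at hdm; simp at hdm
        · rw [hh] at h2 hdm
          simp at h2 hdm
          rw [← hdm]; exact h2
      have hgr : pvGroupRuns (l.drop (pvExpL l i))
          = (true, (l.take (pvExpR l (i + 1))).drop (pvExpL l i))
              :: pvGroupRuns (l.drop (pvExpR l (i + 1))) := by
        rw [← pvDropSplit l (pvExpL l i) (pvExpR l (i + 1)) (by omega) hEn]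
        exact pvGroupRuns_run _ _ hsegne hallseg hresthead
      have hany : ((l.take (pvExpR l (i + 1))).drop (pvExpL l i)).any PySem.Chars.isdigit = true := by
        apply List.any_eq_true.mpr
        refine ⟨l[i], ?_, hd⟩
        rw [hsegsplit, hmid]
        simp
      rw [hgr, List.filterMap_cons_some (b := String.ofList (PySem.Chars.strip
        ((l.take (pvExpR l (i + 1))).drop (pvExpL l i)))) (by simp [pvEmit, hany])]
      congr 1
      by_cases hElt : pvExpR l (i + 1) < l.length
      · have hEdis : pvAllowed (l[pvExpR l (i + 1)]) = false := by
          apply hresthead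
          rw [List.drop_eq_getElem_cons hElt]; simp
        have hexpl : pvExpL l (pvExpR l (i + 1) + 1) = pvExpR l (i + 1) + 1 := by
          unfold pvExpL; rw [List.getD_eq_getElem l ' ' hElt, hEdis]; simp
        have hrec := pvSeek_eq l (pvExpR l (i + 1) + 1) (by omega)
          (by rw [hexpl, List.drop_eq_nil_of_le (by rw [List.length_take]; omega)]; rfl)
        rw [hrec, hexpl]
        conv_rhs => rw [List.drop_eq_getElem_cons hElt]
        exact (pvSkip _ _ hEdis).symm
      · have hEeq : pvExpR l (i + 1) = l.length := by omega
        have hnil : pvSeek l (pvExpR l (i + 1) + 1) = [] := by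
          unfold pvSeek; rw [dif_neg (by omega)]
        rw [hnil, hEeq, List.drop_length]
        simp [pvGroupRuns]
    · next hd =>
      rcases ha : pvAllowed l[i] with _ | _
      · have hexpl : pvExpL l (i + 1) = i + 1 := by
          unfold pvExpL; rw [List.getD_eq_getElem l ' ' h, ha]; simp
        have hrec := pvSeek_eq l (i + 1) (by omega)
          (by rw [hexpl, List.drop_eq_nil_of_le (by rw [List.length_take]; omega)]; rfl)
        rw [hrec, hexpl]
        have hrle : pvExpL l i ≤ i := pvExpL_le l i
        rcases Nat.lt_or_ge (pvExpL l i) i with hri | hri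
        · have hpre_ne : (l.take i).drop (pvExpL l i) ≠ [] := by
            have hlen : ((l.take i).drop (pvExpL l i)).length = i - pvExpL l i := by
              rw [List.length_drop, List.length_take]; omega
            intro hnil; rw [hnil] at hlen; simp at hlen; omega
          have hgr : pvGroupRuns (l.drop (pvExpL l i))
              = (true, (l.take i).drop (pvExpL l i)) :: pvGroupRuns (l.drop i) := by
            rw [← pvDropSplit l (pvExpL l i) i (by omega) (by omega)]
            refine pvGroupRuns_run _ _ hpre_ne (pvExpL_all l i) ?_
            intro d hdm
            rw [List.drop_eq_getElem_cons h, List.head?_cons, Option.mem_def] at hdm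
            have hdeq : l[i] = d := Option.some_inj.mp hdm
            rw [← hdeq]; exact ha
          rw [hgr, List.filterMap_cons_none (by simp [pvEmit, hnd])]
          conv_rhs => rw [List.drop_eq_getElem_cons h]
          exact (pvSkip _ _ ha).symm
        · have hreq : pvExpL l i = i := by omega
          rw [hreq]
          conv_rhs => rw [List.drop_eq_getElem_cons h]
          exact (pvSkip _ _ ha).symm
      · have hexpl : pvExpL l (i + 1) = pvExpL l i := by
          show (if pvAllowed (l.getD i ' ') then pvExpL l i else i + 1) = pvExpL l i
          rw [List.getD_eq_getElem l ' ' h, ha]; simp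
        have hnd' : ((l.take (i + 1)).drop (pvExpL l (i + 1))).any PySem.Chars.isdigit = false := by
          rw [hexpl, List.take_succ_eq_append_getElem h,
            List.drop_append_of_le_length
              (by rw [List.length_take]; have := pvExpL_le l i; omega)]
          rw [List.any_append]
          simp [hnd, hd]
        have hrec := pvSeek_eq l (i + 1) (by omega) hnd'
        rw [hrec, hexpl]
  · next h =>
    have hti : l.take i = l := List.take_of_length_le (by omega)
    rw [hti] at hnd
    refine (pvNoDig (l.drop (pvExpL l i)) ?_ hnd).symm
    have hall := pvExpL_all l i
    rw [hti] at hall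
    exact hall
termination_by l.length - i
decreasing_by
  · have := pvExpR_ge l (i + 1); omega
  · omega
  · omega

-- ===== VERDICT (by name: the statement is the Claim_ definition above) =====
theorem iter_numeric_segments_py_spec : Claim_equal_iter_numeric_segments_py := by
  intro formatted _
  unfold Spec_iter_numeric_segments_py iter_numeric_segments_py iter_numeric_segments_py_alt
  rw [pv_main formatted.toList []]
  simp only [List.nil_append]
  have hB : pvSeek formatted.toList 0
      = (pvGroupRuns formatted.toList).filterMap pvEmit := by
    have := pvSeek_eq formatted.toList 0 (Nat.zero_le _) (by simp [pvExpL])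
    simpa [pvExpL] using this
  rw [hB]
  apply List.filter_eq_self.mpr
  intro s hs
  rcases List.mem_filterMap.mp hs with ⟨g, _, hg⟩
  simp only [pvEmit] at hg
  split at hg
  · next h =>
    rcases hg with ⟨rfl⟩
    have h2 := h
    simp only [Bool.and_eq_true] at h2
    have hd := pv_any_digit_strip g.2 (by simpa using h2.2)
    simpa using hd
  · exact absurd hg (by simp)
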